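-- pv_equiv track=rewrite | github.com/AdemHodzic/python-learning | Day #42/launchSequence.py | solution
-- ===== SOURCE A (Python) =====
-- def solution(sequence, timers):
--     obj = {}
--     for i in range(len(timers)):
--         key = sequence[i]
--         value = timers[i]
--         if key not in obj.keys():
--             obj[key] = [value]
--         else:
--             obj[key].append(value)
--
--     return check(obj)
--
-- def check(obj):
--     for key in obj:
--         if not obj[key] == sorted(obj[key]):
--             return False
--     return True
-- ===== SOURCE B (Python) =====
-- def solution(sequence, timers):
--     # One linear pass: remember the last timer seen per sequence key; a group is
--     # non-decreasing iff no element is smaller than its predecessor in the group.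
--     last = {}
--     ok = True
--     for key, value in zip(sequence, timers):
--         if last.get(key, value) > value:
--             ok = False
--         last[key] = value
--     return ok
-- ===== Notes on version B (the rewrite author's own statement) =====
-- stated objective: simpler
-- what changed: Instead of grouping all timers into per-key lists and comparing each list with its sorted copy, B keeps only the last timer seen per key in one pass and flags any key whose next timer is smaller than its previous one.
import Mathlib
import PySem

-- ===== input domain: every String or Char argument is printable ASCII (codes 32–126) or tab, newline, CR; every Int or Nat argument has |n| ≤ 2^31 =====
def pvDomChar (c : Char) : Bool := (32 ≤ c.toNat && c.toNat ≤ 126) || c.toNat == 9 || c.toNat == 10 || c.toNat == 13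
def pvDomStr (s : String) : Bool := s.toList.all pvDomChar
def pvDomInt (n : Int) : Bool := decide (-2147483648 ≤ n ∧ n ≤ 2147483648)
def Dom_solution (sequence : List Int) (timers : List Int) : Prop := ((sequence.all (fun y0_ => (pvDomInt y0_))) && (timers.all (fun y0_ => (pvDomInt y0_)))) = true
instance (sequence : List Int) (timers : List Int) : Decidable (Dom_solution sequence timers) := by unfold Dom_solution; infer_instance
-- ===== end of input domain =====

-- B replaces A's group-lists-then-compare-with-sorted by a single pass that keeps only the
-- last timer seen per key (equivalence of the RETURN value; neither program mutates its input).

-- ===== PORT A =====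
-- check(obj): 'for key in obj: if not obj[key] == sorted(obj[key]): return False; return True'
def pvCheck (obj : PySem.Dict Int (List Int)) : Bool :=
  obj.keys.all (fun key =>
    obj.getD key [] == PySem.List.sorted (obj.getD key []) (fun x => x) false)

def solution (sequence : List Int) (timers : List Int) : Bool :=
  let obj := (PySem.List.pyRange 0 (timers.length : Int) 1).foldl
    (fun obj i =>
      let key := PySem.List.pyGetD sequence i 0    -- sequence[i]; in range under Pre_
      let value := PySem.List.pyGetD timers i 0    -- timers[i]
      if obj.contains key = false then obj.insert key [value]
      else obj.modify key [] (fun vs => vs ++ [value]))   -- obj[key].append(value)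
    PySem.Dict.empty
  pvCheck obj

-- ===== PORT B =====
def solution_alt (sequence : List Int) (timers : List Int) : Bool :=
  let st := (sequence.zip timers).foldl
    (fun (st : PySem.Dict Int Int × Bool) kv =>
      let ok := if st.1.getD kv.1 kv.2 > kv.2 then false else st.2
      (st.1.insert kv.1 kv.2, ok))
    (PySem.Dict.empty, true)
  st.2

-- ===== PRECONDITION & SPEC =====
-- A indexes sequence[i] for every i < len(timers): when timers is longer than sequence it
-- raises IndexError; Pre_ excludes exactly those inputs.
def Pre_solution (sequence : List Int) (timers : List Int) : Prop :=
  timers.length ≤ sequence.length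
instance (sequence : List Int) (timers : List Int) : Decidable (Pre_solution sequence timers) := by
  unfold Pre_solution; infer_instance

def pvWitness_solution : List Int × List Int := ([1, 1, 2], [2, 3, 1])

def Spec_solution (sequence : List Int) (timers : List Int) (out : Bool) : Prop := out = solution_alt sequence timers
instance (sequence : List Int) (timers : List Int) (out : Bool) : Decidable (Spec_solution sequence timers out) := by unfold Spec_solution; infer_instance

-- ===== CLAIM (what is proved, stated in full; the proofs are below) =====
def Claim_equal_solution : Prop := ∀ (sequence : List Int) (timers : List Int), Dom_solution sequence timers → Pre_solution sequence timers → Spec_solution sequence timers (solution sequence timers)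

-- ===== LEMMAS AND PROOFS =====

-- A's loop body and B's loop body, named (definitionally equal to the inline lambdas of the ports)
def pvStepA (d : PySem.Dict Int (List Int)) (key value : Int) : PySem.Dict Int (List Int) :=
  if d.contains key = false then d.insert key [value]
  else d.modify key [] (fun vs => vs ++ [value])

def pvStepB (st : PySem.Dict Int Int × Bool) (kv : Int × Int) : PySem.Dict Int Int × Bool :=
  (st.1.insert kv.1 kv.2, if st.1.getD kv.1 kv.2 > kv.2 then false else st.2)

-- the timers recorded so far for key k, in order (the list A's dict holds at k)
def pvGrp (l : List (Int × Int)) (k : Int) : List Int :=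
  (l.filter (fun p => p.1 == k)).map (·.2)

theorem pvGrp_append (l : List (Int × Int)) (p : Int × Int) (k : Int) :
    pvGrp (l ++ [p]) k = pvGrp l k ++ (if p.1 = k then [p.2] else []) := by
  simp only [pvGrp, List.filter_append, List.map_append]
  split_ifs with h <;> simp [h]

theorem pvGrp_nil_of_not_mem (l : List (Int × Int)) (k : Int)
    (h : k ∉ l.map (·.1)) : pvGrp l k = [] := by
  simp only [pvGrp, List.map_eq_nil_iff, List.filter_eq_nil_iff]
  intro p hp
  simp only [beq_iff_eq]
  exact fun hk => h (List.mem_map.mpr ⟨p, hp, hk⟩)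

-- an index loop over i < len t reading s[i], t[i] is a fold over zip s t
theorem pvFoldIdxZip {β : Type} (g : β → Int → Int → β) :
    ∀ (t s : List Int) (init : β), t.length ≤ s.length →
      (List.range t.length).foldl (fun d i => g d (s.getD i 0) (t.getD i 0)) init
        = (s.zip t).foldl (fun d kv => g d kv.1 kv.2) init := by
  intro t
  induction t with
  | nil => simp
  | cons v ts ih =>
    intro s init h
    match s with
    | [] => simp at h
    | u :: ss =>
      simp only [List.length_cons, List.range_succ_eq_map, List.foldl_cons, List.foldl_map,
        List.getD_cons_zero, List.getD_cons_succ, List.zip_cons_cons]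
      exact ih ss (g init u v) (by simpa using h)

-- A's conditional step is exactly the unconditional modify step
theorem pvStepA_eq_modify :
    (fun (d : PySem.Dict Int (List Int)) (p : Int × Int) => pvStepA d p.1 p.2)
      = fun d p => d.modify p.1 [] (fun x => x ++ [p.2]) := by
  funext d p
  unfold pvStepA
  split_ifs with h
  · simp [PySem.Dict.modify, PySem.Dict.getD_of_not_contains _ _ h]
  · rfl

-- 'xs == sorted(xs)' is exactly non-decreasing
theorem pvSortedSelf (xs : List Int) :
    (xs == PySem.List.sorted xs (fun x => x) false) = true ↔ xs.Pairwise (· ≤ ·) := by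
  rw [beq_iff_eq]
  constructor
  · intro h
    have hp := PySem.List.sorted_pairwise xs (fun x => x)
    rw [← h] at hp
    simpa using hp
  · intro h
    exact (PySem.List.sorted_eq_self_of_pairwise xs (fun x => x) (by simpa using h)).symm

-- B's dict holds the last element of each group
theorem pvBDict (l : List (Int × Int)) :
    ∀ (k v0 : Int),
      (l.foldl pvStepB (PySem.Dict.empty, true)).1.getD k v0
        = ((pvGrp l k).getLast?).getD v0 := by
  induction l using List.reverseRecOn with
  | nil => intro k v0; simp [pvGrp, PySem.Dict.getD_empty]
  | append_singleton l p ih =>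
    intro k v0
    rw [List.foldl_append, List.foldl_cons, List.foldl_nil, pvGrp_append]
    by_cases h : p.1 = k
    · simp [pvStepB, h]
    · simp only [pvStepB]
      rw [PySem.Dict.getD_insert, if_neg (fun hk => h hk.symm), ih]
      simp [h]

-- B's flag is true iff every group seen so far is adjacently non-decreasing
theorem pvBOk (l : List (Int × Int)) :
    ((l.foldl pvStepB (PySem.Dict.empty, true)).2 = true
      ↔ ∀ k, (pvGrp l k).IsChain (· ≤ ·)) := by
  induction l using List.reverseRecOn with
  | nil => simp [pvGrp]
  | append_singleton l p ih =>
    rw [List.foldl_append, List.foldl_cons, List.foldl_nil]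
    have hstep : (pvStepB (l.foldl pvStepB (PySem.Dict.empty, true)) p).2
        = if ((pvGrp l p.1).getLast?).getD p.2 > p.2 then false
          else (l.foldl pvStepB (PySem.Dict.empty, true)).2 := by
      simp [pvStepB, pvBDict l p.1 p.2]
    rw [hstep]
    by_cases hc : ((pvGrp l p.1).getLast?).getD p.2 > p.2
    · rw [if_pos hc]
      simp only [Bool.false_eq_true, false_iff, not_forall]
      refine ⟨p.1, ?_⟩
      rw [pvGrp_append, if_pos rfl]
      intro hch
      rcases hx : (pvGrp l p.1).getLast? with _ | w
      · rw [hx] at hc; simp at hc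
      · rw [hx] at hc
        simp only [Option.getD_some] at hc
        have := (List.isChain_append.mp hch).2.2 w (by rw [hx]; rfl) p.2 (by simp)
        omega
    · rw [if_neg hc, ih]
      constructor
      · intro h k
        rw [pvGrp_append]
        by_cases hk : p.1 = k
        · subst hk
          rw [if_pos rfl]
          refine List.isChain_append.mpr ⟨h p.1, List.isChain_singleton _, ?_⟩
          intro w hw y hy
          rcases hx : (pvGrp l p.1).getLast? with _ | w'
          · rw [hx] at hw; simp at hw
          · rw [hx] at hw
            rw [hx, Option.getD_some] at hc
            simp only [Option.mem_def, Option.some.injEq] at hw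
            simp only [List.head?_cons, Option.mem_def, Option.some.injEq] at hy
            omega
        · rw [if_neg hk, List.append_nil]
          exact h k
      · intro h k
        have hk := h k
        rw [pvGrp_append] at hk
        exact (List.isChain_append.mp hk).1

-- ===== VERDICT (by name: the statement is the Claim_ definition above) =====
theorem solution_spec : Claim_equal_solution := by
  intro s t _ hpre
  show pvCheck ((PySem.List.pyRange 0 (t.length : Int) 1).foldl
      (fun d i => pvStepA d (PySem.List.pyGetD s i 0) (PySem.List.pyGetD t i 0))
      PySem.Dict.empty)
    = ((s.zip t).foldl pvStepB (PySem.Dict.empty, true)).2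
  rw [PySem.List.pyRange_zero_nat, List.foldl_map]
  simp only [PySem.List.pyGetD_natCast]
  rw [pvFoldIdxZip pvStepA t s PySem.Dict.empty hpre]
  set l := s.zip t with hl
  have hstep : l.foldl (fun d kv => pvStepA d kv.1 kv.2) PySem.Dict.empty
      = l.foldl (fun d p => d.modify p.1 [] (fun x => x ++ [p.2])) PySem.Dict.empty := by
    rw [show (fun d kv => pvStepA d kv.1 kv.2)
        = fun (d : PySem.Dict Int (List Int)) (p : Int × Int) =>
            d.modify p.1 [] (fun x => x ++ [p.2]) from pvStepA_eq_modify]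
  rw [hstep]
  set objA := l.foldl (fun d p => d.modify p.1 [] (fun x => x ++ [p.2])) PySem.Dict.empty with hobj
  have hgetD : ∀ k, objA.getD k [] = pvGrp l k := by
    intro k
    rw [hobj, PySem.Dict.getD_foldl_modify_append l PySem.Dict.empty k]
    simp [pvGrp, PySem.Dict.getD_empty]
  have hkeys : ∀ k, k ∈ objA.keys ↔ k ∈ l.map (·.1) := by
    intro k
    rw [hobj]
    rw [PySem.Dict.keys_foldl_modify_key l (fun p => p.1) [] (fun _ p => (fun x => x ++ [p.2]))
      PySem.Dict.empty]
    simp [PySem.Dict.keys_empty, PySem.Set.mem_update]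
  rw [Bool.eq_iff_iff, pvBOk l]
  unfold pvCheck
  rw [List.all_eq_true]
  constructor
  · intro h k
    by_cases hk : k ∈ l.map (·.1)
    · have hh := h k ((hkeys k).mpr hk)
      rw [hgetD k] at hh
      exact List.isChain_iff_pairwise.mpr ((pvSortedSelf _).mp hh)
    · rw [pvGrp_nil_of_not_mem l k hk]
      exact List.isChain_nil
  · intro h k _
    rw [hgetD k]
    exact (pvSortedSelf _).mpr (List.isChain_iff_pairwise.mp (h k))
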